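-- pv_equiv track=rewrite | github.com/albertolanzini/codeSmellReviewer | .github/scripts/context_extractor.py | _extract_method_context
-- ===== SOURCE A (Python) =====
-- from typing import List
--
-- def _extract_method_context(lines: List[str], issue: dict) -> str:
--     """
--     Extracts the method context around the issue (used for variable-level rules).
--     """
--     method_start, method_end = None, None
--     for i, line in enumerate(lines):
--         if 'void ' in line or 'public ' in line or 'private ' in line:  # Detect method start
--             method_start = i
--         if '}' in line and method_start is not None:  # Detect method end
--             method_end = i
--             break
--     if method_start is not None and method_end is not None:
--         return ''.join(lines[method_start:method_end+1])
--     return ''.join(lines)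
-- ===== SOURCE B (Python) =====
-- from typing import List
--
-- def _extract_method_context(lines: List[str], issue: dict) -> str:
--     """
--     Extracts the method context around the issue (used for variable-level rules).
--     Find-end-then-backtrack decomposition: first take the shortest prefix that
--     ends at a '}' line with some method keyword seen at or before it, then walk
--     that prefix backwards to the last keyword line.
--     """
--     def kw(line):
--         return 'void ' in line or 'public ' in line or 'private ' in line
--
--     prefix = []
--     seen = False
--     found = False
--     for line in lines:
--         prefix.append(line)
--         seen = seen or kw(line)
--         if seen and '}' in line:
--             found = True
--             break
--     if not found:
--         return ''.join(lines)
--     tail = []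
--     for line in reversed(prefix):
--         tail.append(line)
--         if kw(line):
--             return ''.join(reversed(tail))
--     return ''.join(lines)  # unreachable: a keyword line exists in prefix
-- ===== Notes on version B (the rewrite author's own statement) =====
-- stated objective: alternative
-- what changed: Replaces A's single fused index-tracking scan (last keyword index + first brace-after-keyword, then an index slice) with a two-phase decomposition: build the shortest prefix ending at the closing brace, then scan that prefix backwards to the last keyword line, with no index arithmetic or slicing.
import Mathlib
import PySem

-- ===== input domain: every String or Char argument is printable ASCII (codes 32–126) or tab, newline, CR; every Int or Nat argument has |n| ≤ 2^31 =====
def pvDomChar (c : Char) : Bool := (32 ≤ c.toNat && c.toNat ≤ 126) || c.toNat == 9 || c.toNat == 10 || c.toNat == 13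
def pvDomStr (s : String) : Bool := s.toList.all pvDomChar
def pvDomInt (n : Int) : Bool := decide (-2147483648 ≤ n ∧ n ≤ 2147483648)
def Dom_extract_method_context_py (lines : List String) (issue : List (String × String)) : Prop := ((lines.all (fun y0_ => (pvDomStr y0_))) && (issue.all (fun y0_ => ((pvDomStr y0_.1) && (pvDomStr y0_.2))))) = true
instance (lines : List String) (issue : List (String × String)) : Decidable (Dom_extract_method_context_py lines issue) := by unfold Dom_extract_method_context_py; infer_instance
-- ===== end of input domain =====

-- B replaces A's fused index-tracking scan with a find-the-brace-prefix then
-- backtrack-to-last-keyword decomposition (objective: alternative, same cost).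

-- ===== PORT A =====
-- 'void ' in line or 'public ' in line or 'private ' in line
def pvKw (l : String) : Bool :=
  PySem.Str.isIn "void " l || PySem.Str.isIn "public " l || PySem.Str.isIn "private " l

-- '}' in line
def pvBrace (l : String) : Bool := PySem.Str.isIn "}" l

-- A's single for-loop: state (method_start); returns (method_start, method_end)
def pvALoop : List String → Nat → Option Nat → Option Nat × Option Nat
  | [], _, ms => (ms, none)
  | l :: rest, i, ms =>
    let ms' := if pvKw l then some i else ms
    if pvBrace l && ms'.isSome then (ms', some i)
    else pvALoop rest (i + 1) ms'

def extract_method_context_py (lines : List String) (issue : List (String × String)) : String :=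
  match pvALoop lines 0 none with
  | (some s, some e) =>
      PySem.Str.join "" (PySem.List.slice lines (some (s : Int)) (some ((e : Int) + 1)))
  | _ => PySem.Str.join "" lines

-- ===== PORT B =====
-- phase 1: shortest prefix ending at a '}' line with a keyword seen at or before it
def pvBPhase1 : List String → Bool → List String → Option (List String)
  | [], _, _ => none
  | l :: rest, seen, pre =>
    let pre' := pre ++ [l]
    let seen' := seen || pvKw l
    if seen' && pvBrace l then some pre'
    else pvBPhase1 rest seen' pre'

-- phase 2: walk the reversed prefix, collecting tail, until the last keyword line
def pvBPhase2 : List String → List String → Option String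
  | [], _ => none
  | l :: rest, tail =>
    let tail' := tail ++ [l]
    if pvKw l then some (PySem.Str.join "" tail'.reverse)
    else pvBPhase2 rest tail'

def extract_method_context_py_alt (lines : List String) (issue : List (String × String)) : String :=
  match pvBPhase1 lines false [] with
  | none => PySem.Str.join "" lines
  | some pre =>
    match pvBPhase2 pre.reverse [] with
    | some s => s
    | none => PySem.Str.join "" lines

-- ===== PRECONDITION & SPEC =====
def Spec_extract_method_context_py (lines : List String) (issue : List (String × String)) (out : String) : Prop := out = extract_method_context_py_alt lines issue
instance (lines : List String) (issue : List (String × String)) (out : String) : Decidable (Spec_extract_method_context_py lines issue out) := by unfold Spec_extract_method_context_py; infer_instance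

-- ===== CLAIM (what is proved, stated in full; the proofs are below) =====
def Claim_equal_extract_method_context_py : Prop := ∀ (lines : List String) (issue : List (String × String)), Dom_extract_method_context_py lines issue → Spec_extract_method_context_py lines issue (extract_method_context_py lines issue)

-- ===== LEMMAS AND PROOFS =====

-- A's method_start after having consumed the prefix xs: index of the LAST keyword line
def pvMsOf (xs : List String) : Option Nat :=
  (xs.reverse.findIdx? pvKw).map (fun k => xs.length - 1 - k)

theorem pvMsOf_snoc (xs : List String) (l : String) :
    pvMsOf (xs ++ [l]) = if pvKw l then some xs.length else pvMsOf xs := by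
  unfold pvMsOf
  rw [List.reverse_append, List.reverse_singleton, List.singleton_append, List.findIdx?_cons]
  by_cases h : pvKw l
  · simp [h]
  · simp only [h, Bool.false_eq_true, if_false, Option.map_map]
    cases hf : xs.reverse.findIdx? pvKw with
    | none => simp
    | some k =>
      have hk : k < xs.length := by
        have := List.findIdx?_eq_some_iff_findIdx_eq.mp hf
        have := this.1
        simpa using this
      simp only [Option.map_some, Function.comp, List.length_append, List.length_singleton]
      congr 1
      omega

theorem pvMsOf_isSome (xs : List String) : (pvMsOf xs).isSome = xs.any pvKw := by
  unfold pvMsOf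
  rw [Option.isSome_map, List.findIdx?_isSome, List.any_reverse]

theorem pvBPhase2_spec (rev tail : List String) :
    pvBPhase2 rev tail =
      (rev.findIdx? pvKw).map
        (fun k => PySem.Str.join "" (tail ++ rev.take (k + 1)).reverse) := by
  induction rev generalizing tail with
  | nil => simp [pvBPhase2]
  | cons l rest ih =>
    rw [pvBPhase2, List.findIdx?_cons]
    by_cases h : pvKw l
    · simp [h]
    · simp only [h, Bool.false_eq_true, if_false, ih, Option.map_map]
      cases rest.findIdx? pvKw with
      | none => simp
      | some k => simp [List.append_assoc]

-- the prefix slice A takes equals the suffix-of-prefix B rebuilds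
theorem pv_slice_eq (P rest : List String) (s k : Nat)
    (hms : pvMsOf P = some s) (hf : P.reverse.findIdx? pvKw = some k) :
    (List.take (P.length - s) (List.drop s (P ++ rest))) = (P.reverse.take (k + 1)).reverse := by
  have hk : k < P.length := by
    have := List.findIdx?_eq_some_iff_findIdx_eq.mp hf
    simpa using this.1
  have hs : s = P.length - 1 - k := by
    unfold pvMsOf at hms
    rw [hf] at hms
    simpa using hms.symm
  have hsle : s ≤ P.length := by omega
  rw [List.drop_append_of_le_length hsle, List.take_reverse, List.reverse_reverse]
  have hdrop : P.length - (k + 1) = s := by omega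
  rw [hdrop]
  exact List.take_left' (by simp)

theorem pv_main (rest pre : List String) :
    (match pvALoop rest pre.length (pvMsOf pre) with
     | (some s, some e) =>
        PySem.Str.join "" (PySem.List.slice (pre ++ rest) (some (s : Int)) (some ((e : Int) + 1)))
     | _ => PySem.Str.join "" (pre ++ rest))
    =
    (match pvBPhase1 rest (pre.any pvKw) pre with
     | none => PySem.Str.join "" (pre ++ rest)
     | some p =>
       match pvBPhase2 p.reverse [] with
       | some s => s
       | none => PySem.Str.join "" (pre ++ rest)) := by
  induction rest generalizing pre with
  | nil =>
    rw [pvALoop, pvBPhase1]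
    cases pvMsOf pre <;> rfl
  | cons l rest ih =>
    rw [pvALoop, pvBPhase1]
    have hms' : (if pvKw l then some pre.length else pvMsOf pre) = pvMsOf (pre ++ [l]) :=
      (pvMsOf_snoc pre l).symm
    have hseen' : (pre.any pvKw || pvKw l) = (pre ++ [l]).any pvKw := by
      simp
    simp only [hms', hseen']
    have hcond : (pvBrace l && (pvMsOf (pre ++ [l])).isSome)
        = ((pre ++ [l]).any pvKw && pvBrace l) := by
      rw [pvMsOf_isSome, Bool.and_comm]
    by_cases hb : ((pre ++ [l]).any pvKw && pvBrace l) = true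
    · rw [hcond, if_pos hb, if_pos hb]
      -- found: ms' is some
      have hb' : (pre ++ [l]).any pvKw = true ∧ pvBrace l = true := by simpa using hb
      have hsome : (pvMsOf (pre ++ [l])).isSome = true := by
        rw [pvMsOf_isSome]; exact hb'.1
      obtain ⟨s, hs⟩ := Option.isSome_iff_exists.mp hsome
      rw [hs]
      obtain ⟨k, hk⟩ : ∃ k, (pre ++ [l]).reverse.findIdx? pvKw = some k := by
        have : ((pre ++ [l]).reverse.findIdx? pvKw).isSome = true := by
          rw [List.findIdx?_isSome, List.any_reverse]
          exact hb'.1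
        exact Option.isSome_iff_exists.mp this
      have hB : pvBPhase2 (pre ++ [l]).reverse [] =
          some (PySem.Str.join "" ((([] : List String) ++ (pre ++ [l]).reverse.take (k + 1)).reverse)) := by
        rw [pvBPhase2_spec, hk]; rfl
      show PySem.Str.join "" (PySem.List.slice (pre ++ l :: rest) (some (s : Int)) (some ((pre.length : Int) + 1)))
          = (match pvBPhase2 (pre ++ [l]).reverse [] with
             | some str => str
             | none => PySem.Str.join "" (pre ++ l :: rest))
      rw [hB, List.nil_append]
      show PySem.Str.join "" (PySem.List.slice (pre ++ l :: rest) (some (s : Int)) (some ((pre.length : Int) + 1)))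
          = PySem.Str.join "" (((pre ++ [l]).reverse.take (k + 1)).reverse)
      have hcast : ((pre.length : Int) + 1) = (((pre.length + 1 : Nat)) : Int) := by push_cast; ring
      rw [hcast, PySem.List.slice_natCast]
      have heq : pre ++ l :: rest = (pre ++ [l]) ++ rest := by simp
      rw [heq]
      have hslice := pv_slice_eq (pre ++ [l]) rest s k hs hk
      have hsub : pre.length + 1 - s = (pre ++ [l]).length - s := by simp
      rw [hsub, hslice]
    · rw [hcond, if_neg hb, if_neg hb]
      have heq : pre ++ l :: rest = (pre ++ [l]) ++ rest := by simp
      rw [heq]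
      have := ih (pre ++ [l])
      simpa [List.length_append] using this

-- ===== VERDICT (by name: the statement is the Claim_ definition above) =====
theorem extract_method_context_py_spec : Claim_equal_extract_method_context_py := by
  intro lines issue _
  unfold Spec_extract_method_context_py extract_method_context_py extract_method_context_py_alt
  have h := pv_main lines []
  simp only [List.nil_append, List.length_nil] at h
  have hms : pvMsOf ([] : List String) = none := rfl
  rw [hms] at h
  have hany : (([] : List String).any pvKw) = false := rfl
  rw [hany] at h
  exact h
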